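-- pv_equiv track=rewrite | github.com/SwainL/py4interview | binary_search_template.py | findLastElementLessOrEqualThanKey
-- ===== SOURCE A (Python) =====
-- def findLastElementLessOrEqualThanKey(arr, key):
--     """
--     查找最后一个等于或者小于key的元素
--     :param arr:
--     :param key:
--     :return:
--     """
--     start, end = 0, len(arr) -1
--     while start <= end:
--         mid = start + (end - start) // 2
--         if arr[mid] > key:
--             end = mid - 1
--         else:
--             start = mid + 1
--     return end
-- ===== SOURCE B (Python) =====
-- def findLastElementLessOrEqualThanKey(arr, key):
--     """Recursive divide-and-conquer on list slices with an offset accumulator."""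
--     def go(seg, base):
--         if not seg:
--             return base - 1
--         m = (len(seg) - 1) // 2
--         if seg[m] > key:
--             return go(seg[:m], base)
--         return go(seg[m + 1:], base + m + 1)
--     return go(arr, 0)
-- ===== Notes on version B (the rewrite author's own statement) =====
-- stated objective: alternative
-- what changed: Replaced the in-place two-index while loop with a recursive divide-and-conquer helper over list slices carrying an offset accumulator; the empty-slice base case returns base-1 instead of tracking an 'end' index.
import Mathlib
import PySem

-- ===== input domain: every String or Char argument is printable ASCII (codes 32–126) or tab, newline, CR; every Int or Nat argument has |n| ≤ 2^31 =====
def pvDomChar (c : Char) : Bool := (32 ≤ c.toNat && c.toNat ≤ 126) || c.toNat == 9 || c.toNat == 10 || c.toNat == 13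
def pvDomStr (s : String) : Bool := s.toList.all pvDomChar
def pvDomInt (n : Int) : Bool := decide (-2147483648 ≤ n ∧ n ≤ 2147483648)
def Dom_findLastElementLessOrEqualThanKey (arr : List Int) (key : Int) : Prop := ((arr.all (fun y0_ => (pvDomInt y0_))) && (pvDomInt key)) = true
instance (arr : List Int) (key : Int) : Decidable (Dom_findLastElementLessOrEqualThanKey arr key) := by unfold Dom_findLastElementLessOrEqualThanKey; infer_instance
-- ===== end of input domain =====

-- B is an alternative decomposition: recursion over list slices with an offset accumulator,
-- instead of A's in-place two-index while loop (equal cost in comparisons).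

-- ===== PORT A =====
-- the while loop of A, state (start, end); the fuel argument is only a totality guard
-- (the loop runs at most len+1 iterations, so fuel len+1 is never exhausted);
-- arr[mid] is always in range in A's executions
def pvLoopA (arr : List Int) (key : Int) : Nat → Int → Int → Int
  | 0, _, e => e
  | fuel + 1, start, e =>
    if start ≤ e then
      let mid := start + PySem.Int.floordiv (e - start) 2
      if (PySem.List.pyGet? arr mid).getD 0 > key then
        pvLoopA arr key fuel start (mid - 1)
      else
        pvLoopA arr key fuel (mid + 1) e
    else e

def findLastElementLessOrEqualThanKey (arr : List Int) (key : Int) : Int :=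
  pvLoopA arr key (arr.length + 1) 0 ((arr.length : Int) - 1)

-- ===== PORT B =====
-- go(seg, base): empty slice → base - 1; else split at m = (len-1)//2;
-- the fuel argument is only a totality guard (the slice shrinks every call)
def pvGoB (key : Int) : Nat → List Int → Int → Int
  | 0, _, base => base - 1
  | fuel + 1, seg, base =>
    if seg.isEmpty then base - 1
    else
      let m := (seg.length - 1) / 2
      if seg.getD m 0 > key then
        pvGoB key fuel (seg.take m) base
      else
        pvGoB key fuel (seg.drop (m + 1)) (base + (m : Int) + 1)

def findLastElementLessOrEqualThanKey_alt (arr : List Int) (key : Int) : Int :=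
  pvGoB key (arr.length + 1) arr 0

-- ===== PRECONDITION & SPEC =====
def Spec_findLastElementLessOrEqualThanKey (arr : List Int) (key : Int) (out : Int) : Prop := out = findLastElementLessOrEqualThanKey_alt arr key
instance (arr : List Int) (key : Int) (out : Int) : Decidable (Spec_findLastElementLessOrEqualThanKey arr key out) := by unfold Spec_findLastElementLessOrEqualThanKey; infer_instance

-- ===== CLAIM (what is proved, stated in full; the proofs are below) =====
def Claim_equal_findLastElementLessOrEqualThanKey : Prop := ∀ (arr : List Int) (key : Int), Dom_findLastElementLessOrEqualThanKey arr key → Spec_findLastElementLessOrEqualThanKey arr key (findLastElementLessOrEqualThanKey arr key)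

-- ===== LEMMAS AND PROOFS =====

theorem pvGoB_nil (key : Int) (g : Nat) (b : Int) : pvGoB key g [] b = b - 1 := by
  cases g <;> simp [pvGoB]

-- the loop of A on window [s, e] equals go on the slice arr[s : e+1] with base s,
-- for any sufficient fuel on both sides
theorem pvLoopA_eq_goB (arr : List Int) (key : Int) :
    ∀ (f g s : Nat) (e : Int), (e + 1 - s).toNat ≤ f → (e + 1 - s).toNat ≤ g →
      (s : Int) ≤ e + 1 → e < (arr.length : Int) →
      pvLoopA arr key f s e = pvGoB key g ((arr.drop s).take (e + 1 - s).toNat) s := by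
  intro f
  induction f with
  | zero =>
    intro g s e hf hg hse helen
    have hL : (e + 1 - s).toNat = 0 := by omega
    rw [hL]
    simp only [List.take_zero, pvLoopA, pvGoB_nil]
    omega
  | succ f ih =>
    intro g s e hf hg hse helen
    by_cases h : (s : Int) ≤ e
    · -- loop body runs
      set L := (e + 1 - s).toNat with hLdef
      have hLpos : 0 < L := by omega
      obtain ⟨g', rfl⟩ : ∃ g'', g = g'' + 1 := ⟨g - 1, by omega⟩
      have hlen : ((arr.drop s).take L).length = L := by
        simp [List.length_take, List.length_drop]; omega
      have hne : ((arr.drop s).take L).isEmpty = false := by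
        rw [List.isEmpty_eq_false_iff, ← List.length_pos_iff, hlen]; omega
      rw [pvLoopA, pvGoB, if_pos h, hne]
      simp only [Bool.false_eq_true, if_false]
      -- midpoint
      have hfd : PySem.Int.floordiv (e - s) 2 = (((e - s).toNat / 2 : Nat) : Int) := by
        have h0 : (0:Int) ≤ e - s := by omega
        rw [← Int.toNat_of_nonneg h0]
        exact_mod_cast PySem.Int.floordiv_natCast (e - s).toNat 2
      set mN : Nat := (e - s).toNat / 2 with hmN
      have hmid : (s : Int) + PySem.Int.floordiv (e - s) 2 = ((s + mN : Nat) : Int) := by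
        rw [hfd]; push_cast; ring
      have hmEq : (((arr.drop s).take L).length - 1) / 2 = mN := by
        rw [hlen]; omega
      have hmlt : s + mN < arr.length := by
        have : mN ≤ (e - s).toNat := Nat.div_le_self _ _
        omega
      have hmL : mN < L := by
        have : mN ≤ (e - s).toNat := Nat.div_le_self _ _
        omega
      -- the compared element is the same
      have hget : (PySem.List.pyGet? arr ((s : Int) + PySem.Int.floordiv (e - s) 2)).getD 0
          = ((arr.drop s).take L).getD mN 0 := by
        rw [hmid, PySem.List.pyGet?_natCast]
        have h1 : arr[s + mN]? = some arr[s + mN] := List.getElem?_eq_getElem hmlt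
        have h2 : ((arr.drop s).take L).getD mN 0 = ((arr.drop s).take L)[mN] := by
          rw [List.getD_eq_getElem?_getD, List.getElem?_eq_getElem (by omega)]
          rfl
        rw [h1, h2]
        simp [List.getElem_take, List.getElem_drop]
      rw [hget, hmEq]
      by_cases hcmp : ((arr.drop s).take L).getD mN 0 > key
      · simp only [hcmp, if_true]
        have htake : ((arr.drop s).take L).take mN = (arr.drop s).take mN := by
          rw [List.take_take]; congr 1; omega
        rw [htake, hmid]
        have hL1 : ((((s + mN : Nat) : Int) - 1) + 1 - (s : Int)).toNat = mN := by push_cast; omega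
        have h2 := ih g' s (((s + mN : Nat) : Int) - 1)
          (by push_cast; omega) (by push_cast; omega) (by push_cast; omega) (by push_cast; omega)
        rw [hL1] at h2
        push_cast at h2 ⊢
        exact h2
      · simp only [hcmp, if_false]
        have hdrop : ((arr.drop s).take L).drop (mN + 1) = (arr.drop (s + mN + 1)).take (L - (mN + 1)) := by
          rw [List.drop_take, List.drop_drop]
          congr 1
        have hL' : (e + 1 - ((s + mN + 1 : Nat) : Int)).toNat = L - (mN + 1) := by
          push_cast; omega
        rw [hdrop, hmid]
        have h2 := ih g' (s + mN + 1) e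
          (by push_cast; omega) (by push_cast; omega) (by push_cast; omega) helen
        rw [hL'] at h2
        push_cast at h2 ⊢
        exact h2
    · -- loop never runs: e = s - 1
      have hL : (e + 1 - s).toNat = 0 := by omega
      rw [hL]
      simp only [List.take_zero, pvLoopA, pvGoB_nil, if_neg h]
      omega

-- ===== VERDICT (by name: the statement is the Claim_ definition above) =====
theorem findLastElementLessOrEqualThanKey_spec : Claim_equal_findLastElementLessOrEqualThanKey := by
  intro arr key _
  unfold Spec_findLastElementLessOrEqualThanKey findLastElementLessOrEqualThanKey findLastElementLessOrEqualThanKey_alt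
  have h := pvLoopA_eq_goB arr key (arr.length + 1) (arr.length + 1) 0 ((arr.length : Int) - 1)
    (by omega) (by omega) (by omega) (by omega)
  simpa using h
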